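-- pv_equiv track=rewrite | github.com/MattSzm/ctci_solutions | Bit_manipulation/5_4NextNumber.py | PreviousNumber
-- ===== SOURCE A (Python) =====
-- def PreviousNumber(input):
--     if input == 0:
--         return False
--
--     c = input
--     c1 = 0
--     c0 = 0
--     while c&1 == 1:
--         c1 += 1
--         c >>= 1
--
--     while c&1 == 0:
--         c0 += 1
--         c >>= 1
--
--     p = c0 + c1
--     input &= ~(1<<p)
--     input |= 1<<p-1
--     mask = 1<<p-1
--     mask -= 1
--     input |= mask
--     secondmask = ~0
--     secondmask <<= c0-1
--     input &= secondmask
--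
--     return input
-- ===== SOURCE B (Python) =====
-- # Loop-free re-implementation: isolate the lowest set bit of input+1 (= 2^c1, c1 = number of
-- # trailing ones) and of the remainder (= 2^p, p = position of the lowest 0-run's end), then
-- # return the closed-form arithmetic value input - 2^c1 + 1 - 2^(c0-1) directly.
-- def PreviousNumber(input):
--     t = (input + 1) & -(input + 1)   # 2^c1
--     w = input + 1 - t                # high part: m * 2^p
--     u = w & -w                       # 2^p
--     return input - t + 1 - u // (2 * t)
-- ===== Notes on version B (the rewrite author's own statement) =====
-- stated objective: simpler
-- what changed: A counts trailing one- and zero-bits with two shift loops and then builds the answer with six mask operations; B has no loops at all: it isolates the two relevant power-of-two bits with x & -x twice and returns the closed-form value input - 2^c1 + 1 - 2^(c0-1).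
-- outside the precondition, e.g. on PreviousNumber(0): A returns False, B returns 0; on PreviousNumber(7): A does not finish within the time limit, B returns 0; on PreviousNumber(1): A does not finish within the time limit, B returns 0
import Mathlib
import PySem

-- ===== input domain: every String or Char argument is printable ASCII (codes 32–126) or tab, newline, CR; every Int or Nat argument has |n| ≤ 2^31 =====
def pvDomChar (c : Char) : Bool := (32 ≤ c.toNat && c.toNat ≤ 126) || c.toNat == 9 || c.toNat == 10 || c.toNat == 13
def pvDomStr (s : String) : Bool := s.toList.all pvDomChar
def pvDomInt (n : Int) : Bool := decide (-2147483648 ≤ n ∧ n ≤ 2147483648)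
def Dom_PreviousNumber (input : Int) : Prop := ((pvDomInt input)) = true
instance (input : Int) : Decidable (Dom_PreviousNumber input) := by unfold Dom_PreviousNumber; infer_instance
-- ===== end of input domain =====

-- B replaces A's two bit-counting loops and six mask operations by a loop-free closed form
-- built from two lowest-set-bit extractions (x & -x); return values agree on all of Pre_.

-- ===== PORT A =====
-- `while c&1 == 1: c1 += 1; c >>= 1` — fuel 64 suffices: on every input admitted by
-- Pre_ within Dom the loop runs at most 32 times (proved below via pvBound).
def pvLoopOnes : Nat → Int → Nat → Int × Nat
  | 0, c, c1 => (c, c1)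
  | fuel+1, c, c1 =>
    if PySem.Int.band c 1 = 1 then pvLoopOnes fuel (c >>> (1:Nat)) (c1 + 1) else (c, c1)

-- `while c&1 == 0: c0 += 1; c >>= 1`
def pvLoopZeros : Nat → Int → Nat → Int × Nat
  | 0, c, c0 => (c, c0)
  | fuel+1, c, c0 =>
    if PySem.Int.band c 1 = 0 then pvLoopZeros fuel (c >>> (1:Nat)) (c0 + 1) else (c, c0)

def PreviousNumber (input : Int) : Int :=
  if input = 0 then 0   -- Python returns False (not an int) here; excluded by Pre_
  else
    let cc1 := pvLoopOnes 64 input 0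
    let cc0 := pvLoopZeros 64 cc1.1 0
    let c1 := cc1.2
    let c0 := cc0.2
    let p := c0 + c1
    let i1 := PySem.Int.band input (Int.not ((1:Int) <<< p))
    let i2 := PySem.Int.bor i1 ((1:Int) <<< (p - 1))
    let mask := (1:Int) <<< (p - 1)
    let mask1 := mask - 1
    let i3 := PySem.Int.bor i2 mask1
    let secondmask := Int.not 0
    let secondmask1 := secondmask <<< (c0 - 1)
    PySem.Int.band i3 secondmask1

-- ===== PORT B =====
def PreviousNumber_alt (input : Int) : Int :=
  let t := PySem.Int.band (input + 1) (-(input + 1))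
  let w := input + 1 - t
  let u := PySem.Int.band w (-w)
  input - t + 1 - PySem.Int.floordiv u (2 * t)

-- ===== PRECONDITION & SPEC =====
-- Pre_ excludes 0, where A returns False (a bool, not an int), and the all-ones values
-- -1 and 2^k-1 (k ≥ 1), on which A's two counting loops never terminate; these are
-- exactly the inputs on which input & (input+1) vanishes.
def Pre_PreviousNumber (input : Int) : Prop := PySem.Int.band input (input + 1) ≠ 0
instance (input : Int) : Decidable (Pre_PreviousNumber input) := by
  unfold Pre_PreviousNumber; infer_instance

def pvWitness_PreviousNumber : Int := (6)

def Spec_PreviousNumber (input : Int) (out : Int) : Prop := out = PreviousNumber_alt input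
instance (input : Int) (out : Int) : Decidable (Spec_PreviousNumber input out) := by
  unfold Spec_PreviousNumber; infer_instance

-- ===== CLAIM (what is proved, stated in full; the proofs are below) =====
def Claim_equal_PreviousNumber : Prop :=
  ∀ (input : Int), Dom_PreviousNumber input → Pre_PreviousNumber input →
    Spec_PreviousNumber input (PreviousNumber input)

-- ===== LEMMAS AND PROOFS =====

-- Nat bit toolkit ------------------------------------------------------------

lemma pvSplitAnd (k a b r s : Nat) (hr : r < 2^k) (hs : s < 2^k) :
    (2^k*a + r) &&& (2^k*b + s) = 2^k*(a &&& b) + (r &&& s) := by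
  apply Nat.eq_of_testBit_eq
  intro i
  rw [Nat.testBit_and, Nat.testBit_two_pow_mul_add a hr i, Nat.testBit_two_pow_mul_add b hs i,
      Nat.testBit_two_pow_mul_add (a &&& b) (Nat.and_lt_two_pow r hs) i]
  by_cases h : i < k <;> simp [h, Nat.testBit_and]

lemma pvSplitOr (k a b r s : Nat) (hr : r < 2^k) (hs : s < 2^k) :
    (2^k*a + r) ||| (2^k*b + s) = 2^k*(a ||| b) + (r ||| s) := by
  apply Nat.eq_of_testBit_eq
  intro i
  rw [Nat.testBit_or, Nat.testBit_two_pow_mul_add a hr i, Nat.testBit_two_pow_mul_add b hs i,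
      Nat.testBit_two_pow_mul_add (a ||| b) (Nat.or_lt_two_pow hr hs) i]
  by_cases h : i < k <;> simp [h, Nat.testBit_or]

lemma pvOrOnes (k x : Nat) (hx : x < 2^k) : x ||| (2^k - 1) = 2^k - 1 := by
  apply Nat.eq_of_testBit_eq
  intro i
  rw [Nat.testBit_or, Nat.testBit_two_pow_sub_one]
  by_cases h : i < k
  · simp [h]
  · have hx' : x < 2^i := lt_of_lt_of_le hx (Nat.pow_le_pow_right (by norm_num) (Nat.le_of_not_lt h))
    simp [h, Nat.testBit_lt_two_pow hx']

lemma pvAndPred (a : Nat) : (2*a+1) &&& (2*a) = 2*a := by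
  have h := pvSplitAnd 1 a a 1 0 (by norm_num) (by norm_num)
  norm_num [Nat.and_self] at h
  convert h using 2

lemma pvOrOneEven (a : Nat) : (2*a) ||| 1 = 2*a+1 := by
  have h := pvSplitOr 1 a 0 0 1 (by norm_num) (by norm_num)
  norm_num [Nat.or_zero] at h
  convert h using 2

lemma pvAndOneOdd (a : Nat) : (2*a+1) &&& 1 = 1 := by
  rw [Nat.and_one_is_mod]; omega

-- split corollaries in the shapes the chains use

lemma pvSplitAndP (k a r : Nat) (hr : r < 2^k) :
    (2^k*a + r) &&& 2^k = 2^k*(a &&& 1) := by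
  have h := pvSplitAnd k a 1 r 0 hr (Nat.two_pow_pos k)
  simpa [Nat.and_zero] using h

lemma pvSplitOrP (k a r : Nat) (hr : r < 2^k) :
    (2^k*a + r) ||| 2^k = 2^k*(a ||| 1) + r := by
  have h := pvSplitOr k a 1 r 0 hr (Nat.two_pow_pos k)
  simpa [Nat.or_zero] using h

lemma pvSplitAndOnes (k a r : Nat) (hr : r < 2^k) :
    (2^k*a + r) &&& (2^k - 1) = r := by
  simp [Nat.and_two_pow_sub_one_eq_mod, Nat.mul_add_mod, Nat.mod_eq_of_lt hr]

lemma pvSplitOrOnes (k a r : Nat) (hr : r < 2^k) :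
    (2^k*a + r) ||| (2^k - 1) = 2^k*a + (2^k - 1) := by
  have h1 : 1 ≤ 2^k := Nat.one_le_two_pow
  have h := pvSplitOr k a 0 r (2^k - 1) hr (by omega)
  simpa [Nat.or_zero, pvOrOnes k r hr] using h

-- Int shift / not bridges ----------------------------------------------------

lemma pvShiftLOne (p : Nat) : (1:Int) <<< p = ((2^p : Nat) : Int) := by
  show Int.ofNat (1 <<< p) = _
  rw [Nat.shiftLeft_eq, one_mul]
  rfl

lemma pvNotShiftLOne (p : Nat) : Int.not ((1:Int) <<< p) = -((2^p : Nat) : Int) - 1 := by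
  show Int.not (Int.ofNat (1 <<< p)) = _
  rw [Nat.shiftLeft_eq, one_mul]
  show Int.negSucc (2^p) = _
  rw [Int.negSucc_eq]
  push_cast
  ring

lemma pvNotZeroShiftL (k : Nat) : (Int.not 0) <<< k = -((2^k : Nat) : Int) := by
  show Int.negSucc ((0+1) <<< k - 1) = _
  have h1 : (0+1) <<< k = 2^k := by rw [Nat.shiftLeft_eq]; ring
  rw [Int.negSucc_eq, h1]
  have h : 1 ≤ 2^k := Nat.one_le_two_pow
  push_cast [h]
  ring

lemma pvShiftROdd (a : Int) : (2*a+1) >>> (1:Nat) = a := by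
  cases a with
  | ofNat n =>
    rw [show (2 * Int.ofNat n + 1) = Int.ofNat (2*n+1) from by
      rw [Int.ofNat_eq_natCast, Int.ofNat_eq_natCast]; push_cast; ring]
    show Int.ofNat ((2*n+1) >>> 1) = _
    rw [Nat.shiftRight_eq_div_pow, show (2*n+1) / 2^1 = n from by omega]
  | negSucc n =>
    rw [show (2 * Int.negSucc n + 1) = Int.negSucc (2*n) from by
      rw [Int.negSucc_eq, Int.negSucc_eq]; push_cast; ring]
    show Int.negSucc ((2*n) >>> 1) = _
    rw [Nat.shiftRight_eq_div_pow, show (2*n) / 2^1 = n from by omega]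

lemma pvShiftREven (a : Int) : (2*a) >>> (1:Nat) = a := by
  cases a with
  | ofNat n =>
    rw [show (2 * Int.ofNat n) = Int.ofNat (2*n) from by
      rw [Int.ofNat_eq_natCast, Int.ofNat_eq_natCast]; push_cast; ring]
    show Int.ofNat ((2*n) >>> 1) = _
    rw [Nat.shiftRight_eq_div_pow, show (2*n) / 2^1 = n from by omega]
  | negSucc n =>
    rw [show (2 * Int.negSucc n) = Int.negSucc (2*n+1) from by
      rw [Int.negSucc_eq, Int.negSucc_eq]; push_cast; ring]
    show Int.negSucc ((2*n+1) >>> 1) = _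
    rw [Nat.shiftRight_eq_div_pow, show (2*n+1) / 2^1 = n from by omega]

-- PySem.Int.band / bor evaluation on the four sign patterns ------------------

lemma pvBandPosNeg (A B : Nat) :
    PySem.Int.band (A : Int) (-(B:Int) - 1) = ((A - (A &&& B) : Nat) : Int) := by
  have h1 : (0:Int) ≤ (A:Int) := Int.natCast_nonneg A
  have h2 : ¬ ((0:Int) ≤ -(B:Int) - 1) := by omega
  have h3 : (-(-(B:Int) - 1) - 1) = (B:Int) := by ring
  simp only [PySem.Int.band, if_pos h1, if_neg h2, h3, Int.toNat_natCast]

lemma pvBandNegPos (N B : Nat) :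
    PySem.Int.band (-(N:Int) - 1) (B : Int) = ((B - (B &&& N) : Nat) : Int) := by
  have h1 : ¬ ((0:Int) ≤ -(N:Int) - 1) := by omega
  have h2 : (0:Int) ≤ (B:Int) := Int.natCast_nonneg B
  have h3 : (-(-(N:Int) - 1) - 1) = (N:Int) := by ring
  simp only [PySem.Int.band, if_neg h1, if_pos h2, h3, Int.toNat_natCast]

lemma pvBandNegNeg (N B : Nat) :
    PySem.Int.band (-(N:Int) - 1) (-(B:Int) - 1) = -((N ||| B : Nat) : Int) - 1 := by
  have h1 : ¬ ((0:Int) ≤ -(N:Int) - 1) := by omega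
  have h2 : ¬ ((0:Int) ≤ -(B:Int) - 1) := by omega
  have h3 : (-(-(N:Int) - 1) - 1) = (N:Int) := by ring
  have h4 : (-(-(B:Int) - 1) - 1) = (B:Int) := by ring
  simp only [PySem.Int.band, if_neg h1, if_neg h2, h3, h4, Int.toNat_natCast]

lemma pvBorNegPos (N B : Nat) :
    PySem.Int.bor (-(N:Int) - 1) (B : Int) = -((N - (N &&& B) : Nat) : Int) - 1 := by
  have h1 : ¬ ((0:Int) ≤ -(N:Int) - 1) := by omega
  have h2 : (0:Int) ≤ (B:Int) := Int.natCast_nonneg B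
  have h3 : (-(-(N:Int) - 1) - 1) = (N:Int) := by ring
  simp only [PySem.Int.bor, if_neg h1, if_pos h2, h3, Int.toNat_natCast]

-- the lowest-set-bit extraction x & -x ---------------------------------------

lemma pvLowbitNat (E k : Nat) :
    ((2*E+1)*2^k) - (((2*E+1)*2^k) &&& ((2*E+1)*2^k - 1)) = 2^k := by
  have h1 : 1 ≤ 2^k := Nat.one_le_two_pow
  have hx : (2*E+1)*2^k = 2^k*(2*E) + 2^k := by ring
  have hsub : (2*E+1)*2^k - 1 = 2^k*(2*E) + (2^k - 1) := by omega
  have hmain : ((2*E+1)*2^k) &&& ((2*E+1)*2^k - 1) = 2^k*(2*E) := by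
    rw [hsub, show (2*E+1)*2^k = 2^k*(2*E+1) + 0 from by ring,
        pvSplitAnd k (2*E+1) (2*E) 0 (2^k - 1) (by omega) (by omega),
        pvAndPred, Nat.zero_and, Nat.add_zero]
  rw [hmain]
  omega

lemma pvLowbit (e : Int) (k : Nat) :
    PySem.Int.band ((2*e+1) * 2^k) (-((2*e+1) * 2^k)) = ((2^k : Nat) : Int) := by
  rcases (show 0 ≤ e ∨ e < 0 from by omega) with he | he
  · obtain ⟨E, rfl⟩ := Int.eq_ofNat_of_zero_le he
    have hmul : 1 ≤ (2*E+1)*2^k := by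
      have h := Nat.two_pow_pos k
      have h2 : 0 < (2*E+1)*2^k := by positivity
      omega
    have hy : ((2*(E:Int)+1) * 2^k) = (((2*E+1)*2^k : Nat) : Int) := by push_cast; ring
    have hy' : (-((2*(E:Int)+1) * 2^k)) = -((((2*E+1)*2^k - 1 : Nat)) : Int) - 1 := by
      push_cast [hmul]
      ring
    rw [hy', hy, pvBandPosNeg, pvLowbitNat]
  · obtain ⟨E, rfl⟩ : ∃ E : Nat, e = -((E:Int)+1) := ⟨(-e-1).toNat, by omega⟩
    have hmul : 1 ≤ (2*E+1)*2^k := by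
      have h := Nat.two_pow_pos k
      have h2 : 0 < (2*E+1)*2^k := by positivity
      omega
    have hy : ((2*(-((E:Int)+1))+1) * 2^k) = -((((2*E+1)*2^k - 1 : Nat)) : Int) - 1 := by
      push_cast [hmul]
      ring
    have hy' : (-((2*(-((E:Int)+1))+1) * 2^k)) = (((2*E+1)*2^k : Nat) : Int) := by
      push_cast
      ring
    rw [hy', hy, pvBandNegPos, pvLowbitNat]

-- the positive-input mask chain ----------------------------------------------

lemma pvChainPos (E c1 d : Nat) :
    PySem.Int.band
      (PySem.Int.bor
        (PySem.Int.bor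
          (PySem.Int.band (((2^(c1+d+1)*(2*E+1) + (2^c1 - 1) : Nat)) : Int)
            (Int.not ((1:Int) <<< (c1+d+1))))
          ((1:Int) <<< (c1+d)))
        ((1:Int) <<< (c1+d) - 1))
      (Int.not 0 <<< d)
    = ((2^(c1+d+1)*(2*E+1) : Nat) : Int) - ((2^d : Nat) : Int) := by
  have hc1 : (1:Nat) ≤ 2^c1 := Nat.one_le_two_pow
  have hd1 : (1:Nat) ≤ 2^d := Nat.one_le_two_pow
  have hh1 : (1:Nat) ≤ 2^(c1+d) := Nat.one_le_two_pow
  have hch : (2:Nat)^c1 ≤ 2^(c1+d) := Nat.pow_le_pow_right (by norm_num) (by omega)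
  have hhp : (2:Nat)^(c1+d) ≤ 2^(c1+d+1) := Nat.pow_le_pow_right (by norm_num) (by omega)
  have hdh : (2:Nat)^d ≤ 2^(c1+d) := Nat.pow_le_pow_right (by norm_num) (by omega)
  have hCp : 2^c1 - 1 < 2^(c1+d+1) := by omega
  have hCh : 2^c1 - 1 < 2^(c1+d) := by omega
  -- step 1: input &= ~(1 << p)
  rw [pvNotShiftLOne (c1+d+1), pvBandPosNeg,
      pvSplitAndP (c1+d+1) (2*E+1) (2^c1 - 1) hCp, pvAndOneOdd, Nat.mul_one]
  rw [show 2^(c1+d+1)*(2*E+1) + (2^c1 - 1) - 2^(c1+d+1) = 2^(c1+d)*(2*(2*E)) + (2^c1 - 1) from by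
        have e1 : 2^(c1+d+1)*(2*E+1) = 2^(c1+d)*(2*(2*E)) + 2^(c1+d+1) := by
          rw [pow_succ]; ring
        omega]
  -- step 2: input |= 1 << (p-1)
  rw [pvShiftLOne (c1+d), PySem.Int.bor_natCast,
      pvSplitOrP (c1+d) (2*(2*E)) (2^c1 - 1) hCh, pvOrOneEven]
  -- step 3: input |= (1 << (p-1)) - 1
  rw [show (((2^(c1+d) : Nat)) : Int) - 1 = (((2^(c1+d) - 1 : Nat)) : Int) from by
        push_cast [hh1]; ring]
  rw [PySem.Int.bor_natCast, pvSplitOrOnes (c1+d) (2*(2*E)+1) (2^c1 - 1) hCh]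
  -- step 4: input &= (~0) << (c0-1)
  rw [pvNotZeroShiftL d,
      show -(((2^d : Nat)) : Int) = -(((2^d - 1 : Nat)) : Int) - 1 from by
        push_cast [hd1]; ring,
      pvBandPosNeg]
  rw [show 2^(c1+d)*(2*(2*E)+1) + (2^(c1+d) - 1)
        = 2^d*(2^c1*(2*(2*E)+1) + (2^c1 - 1)) + (2^d - 1) from by
        have e1 : 2^d*(2^c1*(2*(2*E)+1) + (2^c1 - 1))
            = 2^d*(2^c1*(2*(2*E)+1)) + 2^d*(2^c1 - 1) := by ring
        have e2 : 2^d*(2^c1*(2*(2*E)+1)) = 2^(c1+d)*(2*(2*E)+1) := by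
          rw [pow_add]; ring
        have e3 : 2^d*(2^c1 - 1) + 2^d*1 = 2^d*(2^c1) := by
          rw [← Nat.mul_add]
          congr 1
          omega
        have e4 : 2^d*(2^c1) = 2^(c1+d) := by rw [pow_add]; ring
        omega]
  rw [pvSplitAndOnes d (2^c1*(2*(2*E)+1) + (2^c1 - 1)) (2^d - 1) (by omega)]
  rw [show 2^d*(2^c1*(2*(2*E)+1) + (2^c1 - 1)) + (2^d - 1) - (2^d - 1)
        = 2^(c1+d+1)*(2*E+1) - 2^d from by
        have e2 : 2^d*(2^c1*(2*(2*E)+1)) = 2^(c1+d)*(2*(2*E)+1) := by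
          rw [pow_add]; ring
        have e1 : 2^d*(2^c1*(2*(2*E)+1) + (2^c1 - 1))
            = 2^d*(2^c1*(2*(2*E)+1)) + 2^d*(2^c1 - 1) := by ring
        have e3 : 2^d*(2^c1 - 1) + 2^d*1 = 2^d*(2^c1) := by
          rw [← Nat.mul_add]
          congr 1
          omega
        have e4 : 2^d*(2^c1) = 2^(c1+d) := by rw [pow_add]; ring
        have e5 : 2^(c1+d+1)*(2*E+1) = 2^(c1+d)*(2*(2*E)+1) + 2^(c1+d) := by
          rw [pow_succ]; ring
        omega]
  have hle : (2:Nat)^d ≤ 2^(c1+d+1)*(2*E+1) := by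
    have e5 : 2^(c1+d+1)*(2*E+1) = 2^(c1+d+1)*(2*E) + 2^(c1+d+1) := by ring
    omega
  rw [Nat.cast_sub hle]

-- the negative-input mask chain ----------------------------------------------

lemma pvChainNeg (E c1 d : Nat) :
    PySem.Int.band
      (PySem.Int.bor
        (PySem.Int.bor
          (PySem.Int.band (-(((2^(c1+d+1)*(2*E) + (2^(c1+d+1) - 2^c1) : Nat)) : Int) - 1)
            (Int.not ((1:Int) <<< (c1+d+1))))
          ((1:Int) <<< (c1+d)))
        ((1:Int) <<< (c1+d) - 1))
      (Int.not 0 <<< d)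
    = -(((2^(c1+d+1)*(2*E+1) : Nat)) : Int) - ((2^d : Nat) : Int) := by
  have hc1 : (1:Nat) ≤ 2^c1 := Nat.one_le_two_pow
  have hd1 : (1:Nat) ≤ 2^d := Nat.one_le_two_pow
  have hh1 : (1:Nat) ≤ 2^(c1+d) := Nat.one_le_two_pow
  have hch : (2:Nat)^c1 ≤ 2^(c1+d) := Nat.pow_le_pow_right (by norm_num) (by omega)
  have hsplit : (2:Nat)^(c1+d+1) = 2^(c1+d)*2 := by rw [pow_succ]
  have hSp : 2^(c1+d+1) - 2^c1 < 2^(c1+d+1) := by omega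
  -- step 1
  rw [pvNotShiftLOne (c1+d+1), pvBandNegNeg,
      pvSplitOrP (c1+d+1) (2*E) (2^(c1+d+1) - 2^c1) hSp, pvOrOneEven]
  -- step 2
  rw [pvShiftLOne (c1+d), pvBorNegPos]
  rw [show 2^(c1+d+1)*(2*E+1) + (2^(c1+d+1) - 2^c1)
        = 2^(c1+d)*(2*(2*E+1)+1) + (2^(c1+d) - 2^c1) from by
        have e1 : 2^(c1+d+1)*(2*E+1) = 2^(c1+d)*(2*(2*E+1)) := by rw [pow_succ]; ring
        have e2 : 2^(c1+d)*(2*(2*E+1)+1) = 2^(c1+d)*(2*(2*E+1)) + 2^(c1+d) := by ring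
        omega]
  rw [pvSplitAndP (c1+d) (2*(2*E+1)+1) (2^(c1+d) - 2^c1) (by omega),
      pvAndOneOdd (2*E+1), Nat.mul_one]
  rw [show 2^(c1+d)*(2*(2*E+1)+1) + (2^(c1+d) - 2^c1) - 2^(c1+d)
        = 2^(c1+d)*(2*(2*E+1)) + (2^(c1+d) - 2^c1) from by
        have e2 : 2^(c1+d)*(2*(2*E+1)+1) = 2^(c1+d)*(2*(2*E+1)) + 2^(c1+d) := by ring
        omega]
  -- step 3
  rw [show (((2^(c1+d) : Nat)) : Int) - 1 = (((2^(c1+d) - 1 : Nat)) : Int) from by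
        push_cast [hh1]; ring]
  rw [pvBorNegPos, pvSplitAndOnes (c1+d) (2*(2*E+1)) (2^(c1+d) - 2^c1) (by omega)]
  rw [show 2^(c1+d)*(2*(2*E+1)) + (2^(c1+d) - 2^c1) - (2^(c1+d) - 2^c1)
        = 2^d*(2^c1*(2*(2*E+1))) + 0 from by
        have e2 : 2^d*(2^c1*(2*(2*E+1))) = 2^(c1+d)*(2*(2*E+1)) := by
          rw [pow_add]; ring
        omega]
  -- step 4
  rw [pvNotZeroShiftL d,
      show -(((2^d : Nat)) : Int) = -(((2^d - 1 : Nat)) : Int) - 1 from by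
        push_cast [hd1]; ring,
      pvBandNegNeg, pvSplitOrOnes d (2^c1*(2*(2*E+1))) 0 (by omega)]
  have hNat : 2^d*(2^c1*(2*(2*E+1))) + (2^d - 1) + 1 = 2^(c1+d+1)*(2*E+1) + 2^d := by
    have e2 : 2^d*(2^c1*(2*(2*E+1))) = 2^(c1+d)*(2*(2*E+1)) := by rw [pow_add]; ring
    have e1 : 2^(c1+d+1)*(2*E+1) = 2^(c1+d)*(2*(2*E+1)) := by rw [pow_succ]; ring
    omega
  have hInt := congrArg (fun n : Nat => (n : Int)) hNat
  push_cast at hInt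
  omega

-- the loops ------------------------------------------------------------------

lemma pvBandOneParity (c : Int) : PySem.Int.band c 1 = c % 2 := by
  rw [PySem.Int.band_one, PySem.Int.mod_eq_emod_of_pos (by norm_num)]

lemma pvLoopOnesSpec : ∀ (j fuel : Nat) (c : Int) (acc : Nat), j < fuel → c % 2 = 0 →
    pvLoopOnes fuel (c * 2^j + 2^j - 1) acc = (c, acc + j) := by
  intro j
  induction j with
  | zero =>
    intro fuel c acc hf hc
    cases fuel with
    | zero => omega
    | succ f =>
      simp only [pvLoopOnes, pow_zero]
      rw [show c * 1 + 1 - 1 = c from by ring, pvBandOneParity, if_neg (by omega)]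
      simp
  | succ j ih =>
    intro fuel c acc hf hc
    cases fuel with
    | zero => omega
    | succ f =>
      have hv : c * 2^(j+1) + 2^(j+1) - 1 = 2*(c * 2^j + 2^j - 1) + 1 := by ring
      simp only [pvLoopOnes]
      rw [hv, pvBandOneParity, if_pos (by omega), pvShiftROdd, ih f c (acc+1) (by omega) hc]
      rw [show acc + 1 + j = acc + (j+1) from by omega]

lemma pvLoopZerosSpec : ∀ (k fuel : Nat) (e : Int) (acc : Nat), k < fuel →
    pvLoopZeros fuel ((2*e+1) * 2^k) acc = (2*e+1, acc + k) := by
  intro k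
  induction k with
  | zero =>
    intro fuel e acc hf
    cases fuel with
    | zero => omega
    | succ f =>
      simp only [pvLoopZeros, pow_zero]
      rw [show (2*e+1) * 1 = 2*e+1 from by ring, pvBandOneParity, if_neg (by omega)]
      simp
  | succ k ih =>
    intro fuel e acc hf
    cases fuel with
    | zero => omega
    | succ f =>
      have hv : (2*e+1) * 2^(k+1) = 2*((2*e+1) * 2^k) := by ring
      simp only [pvLoopZeros]
      rw [hv, pvBandOneParity, if_pos (by omega), pvShiftREven, ih f e (acc+1) (by omega)]
      rw [show acc + 1 + k = acc + (k+1) from by omega]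

-- decomposition of an admitted input -----------------------------------------

lemma pvOddFactor : ∀ (n : Nat) (z : Int), z.natAbs ≤ n → z ≠ 0 →
    ∃ (k : Nat) (e : Int), z = 2^k * (2*e+1) := by
  intro n
  induction n with
  | zero =>
    intro z h hz
    exact absurd (Int.natAbs_eq_zero.mp (by omega)) hz
  | succ n ih =>
    intro z h hz
    rcases Int.even_or_odd z with ⟨w, hw⟩ | ⟨w, hw⟩
    · have hz2 : z = 2 * w := by omega
      have hw0 : w ≠ 0 := by intro h0; rw [h0] at hz2; simp at hz2; exact hz hz2
      have habs : z.natAbs = 2 * w.natAbs := by rw [hz2, Int.natAbs_mul]; norm_num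
      have hwa : 1 ≤ w.natAbs := Int.natAbs_pos.mpr hw0
      obtain ⟨k, e, hke⟩ := ih w (by omega) hw0
      exact ⟨k+1, e, by rw [hz2, hke]; ring⟩
    · exact ⟨0, w, by rw [hw]; ring⟩

lemma pvDecomp (input : Int) (h1 : input ≠ -1)
    (h2 : ∀ k : Nat, input ≠ 2^k - 1) :
    ∃ (e : Int) (c1 d : Nat), input = (2*e+1) * 2^(c1+d+1) + 2^c1 - 1 := by
  have hy : input + 1 ≠ 0 := by omega
  obtain ⟨c1, dd, hdd⟩ := pvOddFactor (input+1).natAbs (input+1) le_rfl hy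
  have hdd0 : dd ≠ 0 := by
    intro hz
    rw [hz] at hdd
    exact h2 c1 (by omega)
  obtain ⟨j, e, hje⟩ := pvOddFactor (2*dd).natAbs (2*dd) le_rfl (by omega)
  have hj : 1 ≤ j := by
    rcases Nat.eq_zero_or_pos j with hj0 | hj0
    · rw [hj0] at hje; simp at hje; omega
    · exact hj0
  obtain ⟨d, rfl⟩ : ∃ d, j = d + 1 := ⟨j-1, by omega⟩
  refine ⟨e, c1, d, ?_⟩
  have hfin : input = 2^c1 * (2*dd+1) - 1 := by omega
  rw [hfin, show (2:Int)*dd = 2^(d+1) * (2*e+1) from hje]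
  ring

-- Pre_ rules out 2^k - 1 -------------------------------------------------------

lemma pvPreNePow (k : Nat) : PySem.Int.band ((2:Int)^k - 1) (2^k) = 0 := by
  have h1 : (1:Nat) ≤ 2^k := Nat.one_le_two_pow
  have e1 : ((2:Int)^k - 1) = (((2^k - 1 : Nat)) : Int) := by push_cast [h1]; ring
  have e2 : ((2:Int)^k) = (((2^k : Nat)) : Int) := by push_cast; ring
  have h := pvSplitAndP k 0 (2^k - 1) (by omega)
  norm_num [Nat.zero_and] at h
  rw [e1, e2, PySem.Int.band_natCast, h]
  simp

-- size bound from the domain --------------------------------------------------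

lemma pvBound (e : Int) (c1 d : Nat) (input : Int)
    (hin : input = (2*e+1) * 2^(c1+d+1) + 2^c1 - 1)
    (hlo : -2147483648 ≤ input) (hhi : input ≤ 2147483648) :
    c1 + d + 1 ≤ 31 := by
  by_contra hp
  have h32 : 32 ≤ c1 + d + 1 := by omega
  have hpow : (2:Int)^32 ≤ 2^(c1+d+1) := pow_le_pow_right₀ (by norm_num) h32
  have hc1pos : (0:Int) < 2^c1 := by positivity
  have hsplit : (2:Int)^(c1+d+1) = 2^(c1+d) * 2 := by rw [pow_succ]
  have hc1h : (2:Int)^c1 ≤ 2^(c1+d) := pow_le_pow_right₀ (by norm_num) (by omega)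
  have h31 : (2:Int)^31 ≤ 2^(c1+d) := pow_le_pow_right₀ (by norm_num) (by omega)
  rcases (show 0 ≤ e ∨ e < 0 from by omega) with he | he
  · have h2 : (2:Int)^(c1+d+1) ≤ (2*e+1) * 2^(c1+d+1) := by
      nlinarith [pow_pos (show (0:Int) < 2 from by norm_num) (c1+d+1)]
    have hfin : (2:Int)^32 ≤ 2147483648 := by omega
    norm_num at hfin
  · have h2 : (2*e+1) * 2^(c1+d+1) ≤ -(2^(c1+d+1)) := by
      nlinarith [pow_pos (show (0:Int) < 2 from by norm_num) (c1+d+1)]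
    have hfin : (2:Int)^31 ≤ 2147483647 := by omega
    norm_num at hfin

-- the two sides computed on the decomposed input ------------------------------

lemma pvAEq (e : Int) (c1 d : Nat) :
    PySem.Int.band
      (PySem.Int.bor
        (PySem.Int.bor
          (PySem.Int.band ((2*e+1) * 2^(c1+d+1) + 2^c1 - 1)
            (Int.not ((1:Int) <<< (c1+d+1))))
          ((1:Int) <<< (c1+d)))
        ((1:Int) <<< (c1+d) - 1))
      (Int.not 0 <<< d)
    = (2*e+1) * 2^(c1+d+1) - 2^d := by
  have h1 : (1:Nat) ≤ 2^c1 := Nat.one_le_two_pow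
  rcases (show 0 ≤ e ∨ e < 0 from by omega) with he | he
  · obtain ⟨E, rfl⟩ := Int.eq_ofNat_of_zero_le he
    have hcast : ((2*(E:Int)+1) * 2^(c1+d+1) + 2^c1 - 1)
        = (((2^(c1+d+1)*(2*E+1) + (2^c1 - 1) : Nat)) : Int) := by
      push_cast [h1]; ring
    rw [hcast, pvChainPos E c1 d]
    push_cast
    ring
  · obtain ⟨E, rfl⟩ : ∃ E : Nat, e = -((E:Int)+1) := ⟨(-e-1).toNat, by omega⟩
    have hcc : (2:Nat)^c1 ≤ 2^(c1+d+1) := Nat.pow_le_pow_right (by norm_num) (by omega)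
    have hcast : ((2*(-((E:Int)+1))+1) * 2^(c1+d+1) + 2^c1 - 1)
        = -(((2^(c1+d+1)*(2*E) + (2^(c1+d+1) - 2^c1) : Nat)) : Int) - 1 := by
      push_cast [hcc]; ring
    rw [hcast, pvChainNeg E c1 d]
    push_cast
    ring

lemma pvAltEq (e : Int) (c1 d : Nat) :
    PreviousNumber_alt ((2*e+1) * 2^(c1+d+1) + 2^c1 - 1) = (2*e+1) * 2^(c1+d+1) - 2^d := by
  have hdef : ∀ x : Int, PreviousNumber_alt x =
      x - PySem.Int.band (x+1) (-(x+1)) + 1 -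
        PySem.Int.floordiv
          (PySem.Int.band (x + 1 - PySem.Int.band (x+1) (-(x+1)))
            (-(x + 1 - PySem.Int.band (x+1) (-(x+1)))))
          (2 * PySem.Int.band (x+1) (-(x+1))) := fun _ => rfl
  rw [hdef]
  rw [show ((2*e+1) * 2^(c1+d+1) + 2^c1 - 1) + 1 = (2*((2*e+1)*2^d)+1) * 2^c1 from by ring]
  rw [pvLowbit ((2*e+1)*2^d) c1]
  rw [show (2*((2*e+1)*2^d)+1) * 2^c1 - (((2^c1 : Nat)) : Int) = (2*e+1) * 2^(c1+d+1) from by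
        push_cast; ring]
  rw [pvLowbit e (c1+d+1)]
  rw [show PySem.Int.floordiv (((2^(c1+d+1) : Nat)) : Int) (2 * (((2^c1 : Nat)) : Int))
        = ((2^d : Nat) : Int) from by
        rw [PySem.Int.floordiv_eq_ediv_of_pos (by positivity)]
        rw [show (((2^(c1+d+1) : Nat)) : Int) = (2 * (((2^c1 : Nat)) : Int)) * ((2^d : Nat) : Int)
              from by push_cast; ring]
        exact Int.mul_ediv_cancel_left _ (by positivity)]
  push_cast
  ring

-- ===== VERDICT (by name: the statement is the Claim_ definition above) =====
theorem PreviousNumber_spec : Claim_equal_PreviousNumber := by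
  intro input hdom hpre
  unfold Spec_PreviousNumber
  have h0 : input ≠ 0 := by
    intro h; rw [h] at hpre; exact hpre (by decide)
  have h1 : input ≠ -1 := by
    intro h; rw [h] at hpre; exact hpre (by decide)
  have h2 : ∀ k : Nat, input ≠ 2^k - 1 := by
    intro k h
    apply hpre
    rw [h, show (2:Int)^k - 1 + 1 = 2^k from by ring]
    exact pvPreNePow k
  obtain ⟨e, c1, d, hin⟩ := pvDecomp input h1 h2
  have hdom' : -2147483648 ≤ input ∧ input ≤ 2147483648 := of_decide_eq_true hdom
  have hp31 : c1 + d + 1 ≤ 31 := pvBound e c1 d input hin hdom'.1 hdom'.2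
  have hc : input = ((2*e+1) * 2^(d+1)) * 2^c1 + 2^c1 - 1 := by rw [hin]; ring
  have hceven : ((2*e+1) * 2^(d+1)) % 2 = 0 := by
    have h : ((2*e+1) * 2^(d+1)) = 2 * ((2*e+1) * 2^d) := by ring
    omega
  have hl1 : pvLoopOnes 64 input 0 = ((2*e+1) * 2^(d+1), 0 + c1) := by
    rw [hc]; exact pvLoopOnesSpec c1 64 _ 0 (by omega) hceven
  have hl2 : pvLoopZeros 64 ((2*e+1) * 2^(d+1)) 0 = (2*e+1, 0 + (d+1)) :=
    pvLoopZerosSpec (d+1) 64 e 0 (by omega)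
  rw [show PreviousNumber input =
      PySem.Int.band
        (PySem.Int.bor
          (PySem.Int.bor
            (PySem.Int.band input (Int.not ((1:Int) <<< (c1+d+1))))
            ((1:Int) <<< (c1+d)))
          ((1:Int) <<< (c1+d) - 1))
        (Int.not 0 <<< d) from by
    unfold PreviousNumber
    rw [if_neg h0]
    simp only [hl1, hl2]
    have e2 : 0 + (d+1) + (0 + c1) - 1 = c1 + d := by omega
    have e3 : 0 + (d+1) - 1 = d := by omega
    have e1 : 0 + (d+1) + (0 + c1) = c1 + d + 1 := by omega
    rw [e2, e3, e1]]
  rw [hin, pvAEq e c1 d, pvAltEq e c1 d]
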